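-- pv_equiv track=rewrite | github.com/JeongHunHui/coding-test-practice | 프로그래머스/2/17683. ［3차］ 방금그곡/［3차］ 방금그곡.py | makeMelody
-- ===== SOURCE A (Python) =====
-- def makeMelody(melody):
--     answer, i = '', 0
--     while i < len(melody):
--         m = melody[i:i+2]
--         if len(m) == 2 and m[1] == '#':
--             answer += m[0].lower()
--             i += 1
--         else:
--             answer += m[0]
--         i += 1
--     return answer
-- ===== SOURCE B (Python) =====
-- import re
--
-- def makeMelody(melody):
--     return re.sub(r'(.)#', lambda m: m.group(1).lower(), melody, flags=re.DOTALL)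
-- ===== Notes on version B (the rewrite author's own statement) =====
-- stated objective: faster
-- what changed: Replaced the explicit cursor-walking while loop with quadratic string concatenation by a single regex substitution that lowercases any character immediately followed by a hash sign.
import Mathlib
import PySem

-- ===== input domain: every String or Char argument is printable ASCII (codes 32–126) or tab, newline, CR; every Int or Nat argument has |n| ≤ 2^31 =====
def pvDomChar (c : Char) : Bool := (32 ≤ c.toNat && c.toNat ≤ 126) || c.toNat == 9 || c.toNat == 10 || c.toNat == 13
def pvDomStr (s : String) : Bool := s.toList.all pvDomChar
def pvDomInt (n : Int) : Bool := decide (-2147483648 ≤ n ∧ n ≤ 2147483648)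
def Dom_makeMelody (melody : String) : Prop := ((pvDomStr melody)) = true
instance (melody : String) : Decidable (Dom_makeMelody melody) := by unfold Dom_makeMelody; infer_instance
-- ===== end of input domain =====

-- B replaces A's cursor-walking loop by one regex-style substitution pass ('(.)#' → lowercased char); idiomatic, same return value.

-- ===== PORT A =====
-- while loop: cursor i over the string, answer accumulated; melody[i:i+2] with 0 ≤ i < len is (drop i).take 2
def makeMelodyLoop (cs : List Char) (i : Nat) (answer : List Char) : List Char :=
  if _h : i < cs.length then
    match (cs.drop i).take 2 with
    | []     => answer            -- unreachable: i < len
    | [c]    => makeMelodyLoop cs (i + 1) (answer ++ [c])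
    | c :: d :: _ =>
      if d = '#' then makeMelodyLoop cs (i + 2) (answer ++ [PySem.Chars.lowerChar c])
      else makeMelodyLoop cs (i + 1) (answer ++ [c])
  else answer
termination_by cs.length - i

def makeMelody (melody : String) : String :=
  String.mk (makeMelodyLoop melody.toList 0 [])

-- ===== PORT B =====
-- hand port of re.sub(r'(.)#', …): left-to-right non-overlapping scan, exact on the ASCII domain
def makeMelodySub : List Char → List Char
  | [] => []
  | [c] => [c]
  | c :: d :: rest =>
    if d = '#' then PySem.Chars.lowerChar c :: makeMelodySub rest
    else c :: makeMelodySub (d :: rest)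

def makeMelody_alt (melody : String) : String :=
  String.mk (makeMelodySub melody.toList)

-- ===== PRECONDITION & SPEC =====
def Spec_makeMelody (melody : String) (out : String) : Prop := out = makeMelody_alt melody
instance (melody : String) (out : String) : Decidable (Spec_makeMelody melody out) := by unfold Spec_makeMelody; infer_instance

-- ===== CLAIM (what is proved, stated in full; the proofs are below) =====
def Claim_equal_makeMelody : Prop := ∀ (melody : String), Dom_makeMelody melody → Spec_makeMelody melody (makeMelody melody)

-- ===== LEMMAS AND PROOFS =====

theorem makeMelodyLoop_eq (cs : List Char) :
    ∀ n i answer, cs.length - i = n →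
      makeMelodyLoop cs i answer = answer ++ makeMelodySub (cs.drop i) := by
  intro n
  induction n using Nat.strong_induction_on with
  | _ n ih =>
    intro i answer hn
    by_cases h : i < cs.length
    · have hne : cs.drop i ≠ [] := by
        simp [List.drop_eq_nil_iff]; omega
      obtain ⟨c, t, ht⟩ := List.exists_cons_of_ne_nil hne
      have hdrop1 : cs.drop (i + 1) = t := by
        have h2 : (cs.drop i).tail = t := by rw [ht]; rfl
        rwa [List.tail_drop] at h2
      cases t with
      | nil =>
        rw [makeMelodyLoop]
        simp only [h, dif_pos, ht, List.take]
        rw [ih (cs.length - (i+1)) (by omega) (i+1) _ rfl, hdrop1]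
        simp [makeMelodySub]
      | cons d u =>
        have hdrop2 : cs.drop (i + 2) = u := by
          have h2 : (cs.drop (i + 1)).tail = u := by rw [hdrop1]; rfl
          rwa [List.tail_drop] at h2
        rw [makeMelodyLoop]
        simp only [h, dif_pos, ht, List.take]
        by_cases hd : d = '#'
        · simp only [hd, if_pos]
          rw [ih (cs.length - (i+2)) (by omega) (i+2) _ rfl, hdrop2]
          simp [makeMelodySub]
        · simp only [if_neg hd]
          rw [ih (cs.length - (i+1)) (by omega) (i+1) _ rfl, hdrop1]
          simp [makeMelodySub, hd]
    · have : cs.drop i = [] := by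
        rw [List.drop_eq_nil_iff]; omega
      rw [makeMelodyLoop]
      simp [h, this, makeMelodySub]

-- ===== VERDICT (by name: the statement is the Claim_ definition above) =====
theorem makeMelody_spec : Claim_equal_makeMelody := by
  intro melody _
  unfold Spec_makeMelody makeMelody makeMelody_alt
  rw [makeMelodyLoop_eq melody.toList _ 0 [] rfl]
  simp
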